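-- pv_equiv track=rewrite | github.com/AmineYK/Automatic-learning-of-ant-interaction-networks | Apprentissage supervisé/bibFunctions.py | discretisation_uniforme_grille
-- ===== SOURCE A (Python) =====
-- def discretisation_uniforme_grille(grid_h,grid_w,bins_h,bins_w):
--     """discretisation de la grille en intervalles 2D
--     A partir de la discretisation extraire les coordonnées des espaces sous 4 points
--     par exemple une grille de (100,500) discretiser en (2,2) on aura : les pas de discretisations respectifs 50 et 250
--     --> [0,50,100] et [0,250,500] ainsi on aura 2*2 espaces disjoints """
--     inter_h = [0]
--     inter_w = [0]
--     res = []
--     pas_h = int(grid_h / bins_h)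
--     pas_w = int(grid_w / bins_w)
--
--     avant = 0
--     for i in range(bins_h):
--         inter_h.append(avant + pas_h)
--         avant = avant + pas_h
--
--     avant = 0
--     for i in range(bins_w):
--         inter_w.append(avant + pas_w)
--         avant = avant + pas_w
--
--     for i in range(bins_h):
--         for j in range(bins_w):
--             res.append((inter_h[i],inter_w[j]))
--
--     formes = []
--     for couple in res:
--         x,y = couple
--         formes.append([(x,y),(x,y+pas_w),(x+pas_h,y),(x+pas_h,y+pas_w)])
--
--     return formes
-- ===== SOURCE B (Python) =====
-- def discretisation_uniforme_grille(grid_h, grid_w, bins_h, bins_w):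
--     """Same grid of 2D rectangle cells, but with closed-form coordinates
--     x = i*pas_h, y = j*pas_w instead of cumulative prefix tables + a pairing pass."""
--     pas_h = int(grid_h / bins_h)
--     pas_w = int(grid_w / bins_w)
--     return [[(i * pas_h, j * pas_w),
--              (i * pas_h, j * pas_w + pas_w),
--              (i * pas_h + pas_h, j * pas_w),
--              (i * pas_h + pas_h, j * pas_w + pas_w)]
--             for i in range(bins_h) for j in range(bins_w)]
-- ===== Notes on version B (the rewrite author's own statement) =====
-- stated objective: simpler
-- what changed: Replaced the two cumulative prefix-coordinate tables, the index-pairing double loop and the separate rectangle-building pass with one comprehension emitting each cell directly from closed-form coordinates i*pas_h, j*pas_w.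
import Mathlib
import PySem

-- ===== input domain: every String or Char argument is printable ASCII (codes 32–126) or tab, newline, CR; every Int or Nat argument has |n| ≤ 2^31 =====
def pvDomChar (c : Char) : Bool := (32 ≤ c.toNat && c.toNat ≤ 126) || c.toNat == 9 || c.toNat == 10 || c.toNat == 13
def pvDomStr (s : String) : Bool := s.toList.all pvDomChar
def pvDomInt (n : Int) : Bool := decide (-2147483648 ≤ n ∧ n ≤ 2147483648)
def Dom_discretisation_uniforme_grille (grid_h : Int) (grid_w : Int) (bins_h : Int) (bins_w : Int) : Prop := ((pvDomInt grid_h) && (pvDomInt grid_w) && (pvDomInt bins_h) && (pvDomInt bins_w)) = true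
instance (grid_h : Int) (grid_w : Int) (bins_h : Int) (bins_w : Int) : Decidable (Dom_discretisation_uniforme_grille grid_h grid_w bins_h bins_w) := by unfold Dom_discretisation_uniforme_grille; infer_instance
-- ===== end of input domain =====

-- B replaces A's cumulative prefix tables + pairing pass + rectangle pass by one
-- double loop with closed-form coordinates i*pas_h, j*pas_w (objective: simpler).

-- ===== PORT A =====
def discretisation_uniforme_grille (grid_h : Int) (grid_w : Int) (bins_h : Int) (bins_w : Int) : List (List (Int × Int)) :=
  let pas_h := PySem.Int.truncdiv grid_h bins_h   -- int(grid_h / bins_h)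
  let pas_w := PySem.Int.truncdiv grid_w bins_w
  -- avant = 0; for i in range(bins_h): inter_h.append(avant + pas_h); avant += pas_h
  let sh := (PySem.List.pyRange 0 bins_h 1).foldl
      (fun (st : List Int × Int) _ => (st.1 ++ [st.2 + pas_h], st.2 + pas_h)) ([0], 0)
  let inter_h := sh.1
  let sw := (PySem.List.pyRange 0 bins_w 1).foldl
      (fun (st : List Int × Int) _ => (st.1 ++ [st.2 + pas_w], st.2 + pas_w)) ([0], 0)
  let inter_w := sw.1
  let res := (PySem.List.pyRange 0 bins_h 1).foldl (fun r i =>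
      (PySem.List.pyRange 0 bins_w 1).foldl (fun r j =>
        r ++ [(PySem.List.pyGetD inter_h i 0, PySem.List.pyGetD inter_w j 0)]) r) []
  res.foldl (fun formes c =>
      formes ++ [[(c.1, c.2), (c.1, c.2 + pas_w), (c.1 + pas_h, c.2), (c.1 + pas_h, c.2 + pas_w)]]) []

-- ===== PORT B =====
def discretisation_uniforme_grille_alt (grid_h : Int) (grid_w : Int) (bins_h : Int) (bins_w : Int) : List (List (Int × Int)) :=
  let pas_h := PySem.Int.truncdiv grid_h bins_h
  let pas_w := PySem.Int.truncdiv grid_w bins_w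
  (PySem.List.pyRange 0 bins_h 1).flatMap (fun i =>
    (PySem.List.pyRange 0 bins_w 1).map (fun j =>
      [(i * pas_h, j * pas_w), (i * pas_h, j * pas_w + pas_w),
       (i * pas_h + pas_h, j * pas_w), (i * pas_h + pas_h, j * pas_w + pas_w)]))

-- ===== PRECONDITION & SPEC =====
-- Python A raises ZeroDivisionError when bins_h = 0 or bins_w = 0; those inputs are excluded.
def Pre_discretisation_uniforme_grille (grid_h : Int) (grid_w : Int) (bins_h : Int) (bins_w : Int) : Prop :=
  bins_h ≠ 0 ∧ bins_w ≠ 0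
instance (grid_h : Int) (grid_w : Int) (bins_h : Int) (bins_w : Int) : Decidable (Pre_discretisation_uniforme_grille grid_h grid_w bins_h bins_w) := by unfold Pre_discretisation_uniforme_grille; infer_instance
def pvWitness_discretisation_uniforme_grille : Int × Int × Int × Int := (100, 500, 2, 2)
def Spec_discretisation_uniforme_grille (grid_h : Int) (grid_w : Int) (bins_h : Int) (bins_w : Int) (out : List (List (Int × Int))) : Prop := out = discretisation_uniforme_grille_alt grid_h grid_w bins_h bins_w
instance (grid_h : Int) (grid_w : Int) (bins_h : Int) (bins_w : Int) (out : List (List (Int × Int))) : Decidable (Spec_discretisation_uniforme_grille grid_h grid_w bins_h bins_w out) := by unfold Spec_discretisation_uniforme_grille; infer_instance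

-- ===== CLAIM (what is proved, stated in full; the proofs are below) =====
def Claim_equal_discretisation_uniforme_grille : Prop := ∀ (grid_h : Int) (grid_w : Int) (bins_h : Int) (bins_w : Int), Dom_discretisation_uniforme_grille grid_h grid_w bins_h bins_w → Pre_discretisation_uniforme_grille grid_h grid_w bins_h bins_w → Spec_discretisation_uniforme_grille grid_h grid_w bins_h bins_w (discretisation_uniforme_grille grid_h grid_w bins_h bins_w)

-- ===== LEMMAS AND PROOFS =====

-- A's cumulative-append loop, characterised: the list built is acc ++ [a+p, a+2p, …].
theorem pv_fold_cum (p : Int) (l : List Int) (acc : List Int) (a : Int) :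
    l.foldl (fun (st : List Int × Int) _ => (st.1 ++ [st.2 + p], st.2 + p)) (acc, a)
      = (acc ++ (List.range l.length).map (fun (k : Nat) => a + ((k : Int) + 1) * p),
         a + l.length * p) := by
  induction l generalizing acc a with
  | nil => simp
  | cons x l ih =>
      rw [List.foldl_cons]
      dsimp only
      rw [ih, List.length_cons, Prod.mk.injEq]
      refine ⟨?_, by push_cast; ring⟩
      rw [List.append_assoc]
      congr 1
      rw [List.range_succ_eq_map, List.map_cons, List.map_map]
      simp only [List.singleton_append, Function.comp_def]
      congr 1
      · push_cast; ring
      · apply List.map_congr_left; intro k _; push_cast; ring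

-- A's inter table equals the closed-form coordinate list 0, p, 2p, …, n*p.
theorem pv_inter_eq (p n : Int) (hn : 0 ≤ n) :
    ((PySem.List.pyRange 0 n 1).foldl
        (fun (st : List Int × Int) _ => (st.1 ++ [st.2 + p], st.2 + p)) ([0], 0)).1
      = (PySem.List.pyRange 0 (n + 1) 1).map (fun k => k * p) := by
  rw [pv_fold_cum, PySem.List.pyRange_one 0 (n + 1)]
  simp only [PySem.List.length_pyRange_one, sub_zero]
  have h1 : (n + 1).toNat = n.toNat + 1 := by omega
  rw [h1, List.range_succ_eq_map, List.map_cons, List.map_cons, List.map_map, List.map_map]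
  simp only [List.singleton_append, Function.comp_def]
  congr 1
  · push_cast; ring
  · apply List.map_congr_left; intro k _; push_cast; ring

theorem discretisation_uniforme_grille_eq (grid_h grid_w bins_h bins_w : Int) :
    discretisation_uniforme_grille grid_h grid_w bins_h bins_w
      = discretisation_uniforme_grille_alt grid_h grid_w bins_h bins_w := by
  unfold discretisation_uniforme_grille discretisation_uniforme_grille_alt
  by_cases hh : 0 < bins_h
  · by_cases hw : 0 < bins_w
    · simp only [pv_inter_eq _ _ (le_of_lt hh), pv_inter_eq _ _ (le_of_lt hw),
        PySem.List.foldl_append_singleton_eq_map, PySem.List.foldl_append_eq_flatMap]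
      simp only [List.nil_append]
      rw [List.map_flatMap]
      apply List.flatMap_congr; intro i hi
      rw [List.map_map]
      apply List.map_congr_left; intro j hj
      simp only [Function.comp_apply]
      rw [PySem.List.mem_pyRange_one] at hi hj
      rw [PySem.List.pyGetD_map_pyRange_of_nonneg _ _ _ _ hi.1 (by omega),
          PySem.List.pyGetD_map_pyRange_of_nonneg _ _ _ _ hj.1 (by omega)]
    · rw [PySem.List.pyRange_one_eq_nil (b := bins_w) (by omega)]
      simp
  · rw [PySem.List.pyRange_one_eq_nil (b := bins_h) (by omega)]
    simp

-- ===== VERDICT (by name: the statement is the Claim_ definition above) =====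
theorem discretisation_uniforme_grille_spec : Claim_equal_discretisation_uniforme_grille := by
  intro gh gw bh bw _ _
  exact discretisation_uniforme_grille_eq gh gw bh bw
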